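-- pv_equiv track=rewrite | github.com/thy-amigo/OBS_ST | gw/tx_logParser.py | get_call_ref
-- ===== SOURCE A (Python) =====
-- def get_call_ref(file, ccapi):
--     got_one=False
--     line_counter=0
--     find_string = "callref = "
--     # got_call_ref = False
--     call_ref=""
--     for line in file:
--         line_counter += 1
--         if ccapi in line and "/CCAPI/ccSaveDialpeerTag:" in line:
--             got_one=True
--             line_counter=0
--         if got_one and line_counter<6:
--             if find_string in line:
--                 loc = line.find(find_string)
--                 call_ref = line[loc+len(find_string) : ].split(" ")[0]
--                 # got_call_ref=True
--                 return call_ref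
-- ===== SOURCE B (Python) =====
-- def get_call_ref(file, ccapi):
--     # Marker-then-lookahead decomposition: for each marker line (in order), scan
--     # the 6-line window starting at it (marker line + 5 following) for the first
--     # "callref = " line; the first window hit is the answer.  No counter state.
--     lines = list(file)
--     find_string = "callref = "
--     for i, line in enumerate(lines):
--         if ccapi in line and "/CCAPI/ccSaveDialpeerTag:" in line:
--             for cand in lines[i:i + 6]:
--                 if find_string in cand:
--                     loc = cand.find(find_string)
--                     return cand[loc + len(find_string):].split(" ")[0]
--     return None
-- ===== Notes on version B (the rewrite author's own statement) =====
-- stated objective: alternative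
-- what changed: Replaces A's single pass with rolling got_one/line_counter state by a marker-then-lookahead decomposition: enumerate the lines, and at each marker line scan the 6-line window (marker plus five following) for the first 'callref = ' line, returning its extracted token; no counter state is threaded.
import Mathlib
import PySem

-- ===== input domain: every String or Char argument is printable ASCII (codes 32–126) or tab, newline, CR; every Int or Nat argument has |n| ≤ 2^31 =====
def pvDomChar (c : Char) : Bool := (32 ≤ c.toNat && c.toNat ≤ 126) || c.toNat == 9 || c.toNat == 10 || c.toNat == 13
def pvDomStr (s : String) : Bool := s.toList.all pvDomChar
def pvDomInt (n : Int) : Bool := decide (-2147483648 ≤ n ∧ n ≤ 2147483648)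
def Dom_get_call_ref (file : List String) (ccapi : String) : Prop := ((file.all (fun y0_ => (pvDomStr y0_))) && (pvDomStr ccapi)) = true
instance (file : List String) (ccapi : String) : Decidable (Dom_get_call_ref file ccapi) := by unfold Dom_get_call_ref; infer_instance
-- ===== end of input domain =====

-- B replaces A's rolling got_one/line_counter state machine by a marker-then-lookahead
-- decomposition (each marker line opens a 6-line window scanned for "callref = "); alternative, not faster.

-- helpers shared by both ports (identical Python expressions in A and B):
-- 'ccapi in line and "/CCAPI/ccSaveDialpeerTag:" in line'
def pvMark (ccapi line : String) : Bool :=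
  PySem.Str.isIn ccapi line && PySem.Str.isIn "/CCAPI/ccSaveDialpeerTag:" line
-- 'find_string in line'
def pvCheck (line : String) : Bool := PySem.Str.isIn "callref = " line
-- 'loc = line.find(find_string); line[loc+len(find_string):].split(" ")[0]'
-- (split? with the nonempty separator " " is always `some` of a nonempty list, so getD/headD never take their defaults: [0] is the head)
def pvExtract (line : String) : String :=
  let loc := PySem.Str.find line "callref = "
  (((PySem.Str.split? (PySem.Str.slice line (some (loc + PySem.Str.len "callref = ")) none) " ").getD []).headD "")

-- ===== PORT A =====
-- A's for-loop with state (got_one, line_counter); returning = some, falling through = none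
def pvGoA (ccapi : String) : List String → Bool → Int → Option String
  | [], _, _ => none
  | line :: rest, got_one, line_counter =>
    let line_counter := line_counter + 1
    let s := if pvMark ccapi line then (true, (0 : Int)) else (got_one, line_counter)
    if s.1 && decide (s.2 < 6) then
      if pvCheck line then some (pvExtract line)
      else pvGoA ccapi rest s.1 s.2
    else pvGoA ccapi rest s.1 s.2

def get_call_ref (file : List String) (ccapi : String) : Option String :=
  pvGoA ccapi file false 0

-- ===== PORT B =====
-- B's inner loop: first "callref = " line of a window
def pvFindRef : List String → Option String
  | [] => none
  | cand :: rest => if pvCheck cand then some (pvExtract cand) else pvFindRef rest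

-- B's outer loop over enumerate(lines)
def pvGoB (ccapi : String) (lines : List String) : List (Int × String) → Option String
  | [] => none
  | (i, line) :: rest =>
    if pvMark ccapi line then
      match pvFindRef (PySem.List.slice lines (some i) (some (i + 6))) with
      | some r => some r
      | none => pvGoB ccapi lines rest
    else pvGoB ccapi lines rest

def get_call_ref_alt (file : List String) (ccapi : String) : Option String :=
  pvGoB ccapi file (PySem.List.enumerate file 0)

-- ===== PRECONDITION & SPEC =====
def Spec_get_call_ref (file : List String) (ccapi : String) (out : Option String) : Prop := out = get_call_ref_alt file ccapi
instance (file : List String) (ccapi : String) (out : Option String) : Decidable (Spec_get_call_ref file ccapi out) := by unfold Spec_get_call_ref; infer_instance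

-- ===== CLAIM (what is proved, stated in full; the proofs are below) =====
def Claim_equal_get_call_ref : Prop := ∀ (file : List String) (ccapi : String), Dom_get_call_ref file ccapi → Spec_get_call_ref file ccapi (get_call_ref file ccapi)

-- ===== LEMMAS AND PROOFS =====

-- common reference form: scan with a remaining-window counter k (reset to 6 at a marker)
def pvScan (ccapi : String) : List String → Nat → Option String
  | [], _ => none
  | l :: rest, k =>
    let k' := if pvMark ccapi l then 6 else k
    if k' ≠ 0 && pvCheck l then some (pvExtract l) else pvScan ccapi rest (k' - 1)

-- A's state (got_one, line_counter) determines the remaining window (5 - lc).toNat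
theorem pvGoA_eq_scan (ccapi : String) (xs : List String) :
    ∀ (got : Bool) (lc : Int), 0 ≤ lc →
      pvGoA ccapi xs got lc = pvScan ccapi xs (if got then (5 - lc).toNat else 0) := by
  induction xs with
  | nil => intro got lc _; cases got <;> rfl
  | cons l rest ih =>
    intro got lc hlc
    rw [pvGoA, pvScan]
    by_cases hm : pvMark ccapi l = true
    · simp only [hm, if_true]
      by_cases hc : pvCheck l = true
      · simp [hc]
      · simp only [Bool.not_eq_true] at hc
        have h5 : ((5 : Int) - 0).toNat = 5 := by decide
        simp [hc, ih true 0 le_rfl, h5]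
    · simp only [Bool.not_eq_true] at hm
      simp only [hm, Bool.false_eq_true, if_false]
      cases got with
      | false =>
        have := ih false (lc + 1) (by omega)
        simp only [Bool.false_eq_true, if_false] at this
        simp [this]
      | true =>
        by_cases hlt : lc + 1 < 6
        · have hd : decide (lc + 1 < 6) = true := by simpa using hlt
          have hne : ((5 : Int) - lc).toNat ≠ 0 := by omega
          by_cases hc : pvCheck l = true
          · simp [hd, hc, hne]
          · simp only [Bool.not_eq_true] at hc
            have := ih true (lc + 1) (by omega)
            have harith : ((5 : Int) - (lc + 1)).toNat = ((5 : Int) - lc).toNat - 1 := by omega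
            simp [hd, hc, this, harith]
        · have hd : decide (lc + 1 < 6) = false := by simpa using hlt
          have hz : ((5 : Int) - lc).toNat = 0 := by omega
          have := ih true (lc + 1) (by omega)
          have harith : ((5 : Int) - (lc + 1)).toNat = 0 := by omega
          simp [hd, hz, this, harith]
theorem pvFindRef_take_some (ccapi : String) (xs : List String) :
    ∀ (j k : Nat) (r : String), j ≤ k → j ≤ 6 → pvFindRef (xs.take j) = some r →
      pvScan ccapi xs k = some r := by
  induction xs with
  | nil => intro j k r _ _ h; simp [pvFindRef] at h
  | cons l rest ih =>
    intro j k r hjk hj6 h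
    cases j with
    | zero => simp [pvFindRef] at h
    | succ j' =>
      rw [List.take_succ_cons, pvFindRef] at h
      rw [pvScan]
      by_cases hc : pvCheck l = true
      · rw [if_pos hc] at h
        have hk' : ((if pvMark ccapi l then 6 else k) : Nat) ≠ 0 := by
          by_cases hm : pvMark ccapi l = true <;> simp [hm]; omega
        simp [hc, hk', h]
      · simp only [Bool.not_eq_true] at hc
        rw [if_neg (by simp [hc])] at h
        by_cases hm : pvMark ccapi l = true
        · simp only [hm, if_true, hc, Bool.and_false, Bool.false_eq_true, if_false]
          exact ih j' (6 - 1) r (by omega) (by omega) h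
        · simp only [Bool.not_eq_true] at hm
          simp only [hm, Bool.false_eq_true, if_false, hc, Bool.and_false]
          exact ih j' (k - 1) r (by omega) (by omega) h

theorem pvScan_pending (ccapi : String) (xs : List String) :
    ∀ (k : Nat), k ≤ 6 →
      pvScan ccapi xs k =
        (match pvFindRef (xs.take k) with
         | some r => some r
         | none => pvScan ccapi xs 0) := by
  induction xs with
  | nil => intro k _; simp [pvScan, pvFindRef]
  | cons l rest ih =>
    intro k hk6
    by_cases hc : pvCheck l = true
    · by_cases hm : pvMark ccapi l = true
      · cases k with
        | zero => simp [pvScan, pvFindRef, hm, hc]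
        | succ k' => simp [pvScan, pvFindRef, hm, hc]
      · simp only [Bool.not_eq_true] at hm
        cases k with
        | zero => simp [pvScan, pvFindRef, hm, hc]
        | succ k' => simp [pvScan, pvFindRef, hm, hc]
    · simp only [Bool.not_eq_true] at hc
      by_cases hm : pvMark ccapi l = true
      · have hL : ∀ k0 : Nat, pvScan ccapi (l :: rest) k0 = pvScan ccapi rest 5 := by
          intro k0; simp [pvScan, hm, hc]
        cases k with
        | zero => simp [hL, pvFindRef]
        | succ k' =>
          rw [hL, List.take_succ_cons]
          simp only [pvFindRef, hc, Bool.false_eq_true, if_false, hL]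
          cases hf : pvFindRef (rest.take k') with
          | some r => exact pvFindRef_take_some ccapi rest k' 5 r (by omega) (by omega) hf
          | none => rfl
      · simp only [Bool.not_eq_true] at hm
        have hL0 : pvScan ccapi (l :: rest) 0 = pvScan ccapi rest 0 := by
          simp [pvScan, hm, hc]
        cases k with
        | zero => simp [pvFindRef, hL0]
        | succ k' =>
          have hL : pvScan ccapi (l :: rest) (k' + 1) = pvScan ccapi rest k' := by
            simp [pvScan, hm, hc]
          rw [hL, List.take_succ_cons]
          simp only [pvFindRef, hc, Bool.false_eq_true, if_false, hL0]
          cases hf : pvFindRef (rest.take k') with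
          | some r => exact pvFindRef_take_some ccapi rest k' k' r le_rfl (by omega) hf
          | none => rw [ih k' (by omega), hf]

-- B's enumerate loop over a suffix = scan of that suffix with no pending window
theorem pvGoB_eq_scan (ccapi : String) (L : List String) (xs : List String) :
    ∀ (i : Nat), L.drop i = xs →
      pvGoB ccapi L (PySem.List.enumerate xs (i : Int)) = pvScan ccapi xs 0 := by
  induction xs with
  | nil => intro i _; simp [PySem.List.enumerate_nil, pvGoB, pvScan]
  | cons x rest ih =>
    intro i hdrop
    rw [PySem.List.enumerate_cons]
    by_cases hm : pvMark ccapi x = true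
    · have hslice : PySem.List.slice L (some (i : Int)) (some ((i : Int) + 6)) = x :: rest.take 5 := by
        have h6 : ((i : Int) + 6) = ((i : Int) + ((6 : Nat) : Int)) := by norm_num
        rw [h6, PySem.List.slice_natCast_add, hdrop]
        rfl
      have hdrop' : L.drop (i + 1) = rest := by
        rw [← List.drop_drop, hdrop]; rfl
      have htail : pvGoB ccapi L (PySem.List.enumerate rest ((i : Int) + 1)) = pvScan ccapi rest 0 := by
        have : ((i : Int) + 1) = (((i + 1 : Nat)) : Int) := by push_cast; ring
        rw [this]; exact ih (i + 1) hdrop'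
      simp only [pvGoB, hm, if_true, hslice]
      by_cases hc : pvCheck x = true
      · simp [pvScan, pvFindRef, hm, hc]
      · simp only [Bool.not_eq_true] at hc
        simp only [pvFindRef, hc, Bool.false_eq_true, if_false]
        have hR : pvScan ccapi (x :: rest) 0 = pvScan ccapi rest 5 := by
          simp [pvScan, hm, hc]
        rw [hR, pvScan_pending ccapi rest 5 (by omega)]
        cases hf : pvFindRef (rest.take 5) with
        | some r => rfl
        | none => simpa using htail
    · simp only [Bool.not_eq_true] at hm
      have hdrop' : L.drop (i + 1) = rest := by
        rw [← List.drop_drop, hdrop]; rfl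
      have htail : pvGoB ccapi L (PySem.List.enumerate rest ((i : Int) + 1)) = pvScan ccapi rest 0 := by
        have : ((i : Int) + 1) = (((i + 1 : Nat)) : Int) := by push_cast; ring
        rw [this]; exact ih (i + 1) hdrop'
      simp only [pvGoB, hm, Bool.false_eq_true, if_false, htail]
      simp [pvScan, hm]

-- ===== VERDICT (by name: the statement is the Claim_ definition above) =====
theorem get_call_ref_spec : Claim_equal_get_call_ref := by
  intro file ccapi _
  unfold Spec_get_call_ref get_call_ref get_call_ref_alt
  rw [pvGoA_eq_scan ccapi file false 0 le_rfl]
  have h0 : ((0 : Nat) : Int) = (0 : Int) := rfl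
  rw [← h0, pvGoB_eq_scan ccapi file file 0 (by rfl)]
  simp
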